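-- pv_equiv track=rewrite | github.com/Xuperbad/QYN_configTool | config.py | _group_changes_by_type
-- ===== SOURCE A (Python) =====
-- def _group_changes_by_type(changes):
--     """按变更类型分组"""
--     groups = {'新增': [], '删除': [], '替换': []}
--
--     for change in changes:
--         # 变更记录格式: (row_num, col, old_item, new_item, arr_pos, arr_type)
--         # 需要从变更记录中推断变更类型
--         if len(change) >= 4:
--             row_num, col, old_item, new_item, arr_pos, arr_type = change
--
--             if old_item and new_item:
--                 change_type = '替换'
--             elif new_item and not old_item:
--                 change_type = '新增'
--             elif old_item and not new_item:
--                 change_type = '删除'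
--             else:
--                 continue  # 跳过无效变更
--
--             # 重新构造变更记录，包含推断的类型
--             enhanced_change = (row_num, col, old_item, new_item, arr_pos, arr_type)
--             groups[change_type].append(enhanced_change)
--
--     return {k: v for k, v in groups.items() if v}  # 只返回非空组
-- ===== SOURCE B (Python) =====
-- def _classify(change):
--     """Return the inferred change type for a record, or None to skip it."""
--     if len(change) < 4:
--         return None
--     row_num, col, old_item, new_item, arr_pos, arr_type = change
--     if old_item and new_item:
--         return '替换'
--     if new_item:
--         return '新增'
--     if old_item:
--         return '删除'
--     return None
--
--
-- def _group_changes_by_type(changes):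
--     """按变更类型分组"""
--     result = {}
--     for t in ('新增', '删除', '替换'):
--         bucket = [c for c in changes if _classify(c) == t]
--         if bucket:
--             result[t] = bucket
--     return result
-- ===== Notes on version B (the rewrite author's own statement) =====
-- stated objective: alternative
-- what changed: Replaces the single classify-and-append pass into three mutable buckets with a classify(change) helper plus one filtering scan of the input per fixed type key, adding each key only when its filtered list is non-empty.
import Mathlib
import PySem

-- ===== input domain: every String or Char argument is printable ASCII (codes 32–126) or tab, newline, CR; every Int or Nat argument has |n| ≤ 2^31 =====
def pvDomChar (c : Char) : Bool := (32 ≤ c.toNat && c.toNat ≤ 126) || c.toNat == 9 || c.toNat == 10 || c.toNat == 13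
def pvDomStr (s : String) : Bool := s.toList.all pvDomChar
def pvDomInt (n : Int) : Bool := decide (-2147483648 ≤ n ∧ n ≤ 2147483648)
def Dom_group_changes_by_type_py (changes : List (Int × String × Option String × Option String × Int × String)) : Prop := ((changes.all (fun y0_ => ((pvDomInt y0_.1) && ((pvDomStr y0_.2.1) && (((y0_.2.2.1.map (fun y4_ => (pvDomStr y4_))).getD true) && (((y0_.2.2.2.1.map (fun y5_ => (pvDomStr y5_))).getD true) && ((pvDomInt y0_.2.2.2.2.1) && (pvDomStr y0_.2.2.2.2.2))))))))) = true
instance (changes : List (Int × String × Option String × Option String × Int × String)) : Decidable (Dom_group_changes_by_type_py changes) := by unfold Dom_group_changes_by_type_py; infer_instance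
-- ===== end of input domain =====

-- B replaces A's single classify-and-append pass into three mutable buckets by a classify
-- helper plus one filtering scan per fixed type key (objective: alternative decomposition).
-- On typed 6-tuples every record has length 6, so A's `len(change) >= 4` test is always true
-- and the exactly-6 unpack never raises: both ports are total.

-- ===== PORT A =====
-- Python truthiness of an Optional[str]: None and '' are falsy.
def pvTruthy (o : Option String) : Bool :=
  match o with
  | none => false
  | some s => !(s == "")

-- the `for change in changes` loop of A, carrying the three bucket lists of `groups`
def groupChangesLoopA (changes : List (Int × String × Option String × Option String × Int × String))
    (gNew gDel gRep : List (Int × String × Option String × Option String × Int × String)) :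
    List (Int × String × Option String × Option String × Int × String) ×
    List (Int × String × Option String × Option String × Int × String) ×
    List (Int × String × Option String × Option String × Int × String) :=
  match changes with
  | [] => (gNew, gDel, gRep)
  | c :: rest =>
    -- len(change) >= 4 always holds for a 6-tuple
    let old_item := c.2.2.1
    let new_item := c.2.2.2.1
    if pvTruthy old_item && pvTruthy new_item then
      groupChangesLoopA rest gNew gDel (gRep ++ [c])
    else if pvTruthy new_item && !pvTruthy old_item then
      groupChangesLoopA rest (gNew ++ [c]) gDel gRep
    else if pvTruthy old_item && !pvTruthy new_item then
      groupChangesLoopA rest gNew (gDel ++ [c]) gRep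
    else
      groupChangesLoopA rest gNew gDel gRep  -- continue: 跳过无效变更

def group_changes_by_type_py (changes : List (Int × String × Option String × Option String × Int × String)) : List (String × List (Int × String × Option String × Option String × Int × String)) :=
  let g := groupChangesLoopA changes [] [] []
  -- {k: v for k, v in groups.items() if v}, over the fixed insertion order 新增/删除/替换
  ([("新增", g.1), ("删除", g.2.1), ("替换", g.2.2)]).filter (fun kv => !kv.2.isEmpty)

-- ===== PORT B =====
-- _classify(change): the len(change) < 4 guard of Source B is vacuous on typed 6-tuples
def pvClassify (c : Int × String × Option String × Option String × Int × String) : Option String :=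
  let old_item := c.2.2.1
  let new_item := c.2.2.2.1
  if pvTruthy old_item && pvTruthy new_item then some "替换"
  else if pvTruthy new_item then some "新增"
  else if pvTruthy old_item then some "删除"
  else none

def group_changes_by_type_py_alt (changes : List (Int × String × Option String × Option String × Int × String)) : List (String × List (Int × String × Option String × Option String × Int × String)) :=
  (["新增", "删除", "替换"]).filterMap (fun t =>
    let bucket := changes.filter (fun c => pvClassify c == some t)
    if bucket.isEmpty then none else some (t, bucket))

-- ===== PRECONDITION & SPEC =====
def Spec_group_changes_by_type_py (changes : List (Int × String × Option String × Option String × Int × String)) (out : List (String × List (Int × String × Option String × Option String × Int × String))) : Prop := out = group_changes_by_type_py_alt changes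
instance (changes : List (Int × String × Option String × Option String × Int × String)) (out : List (String × List (Int × String × Option String × Option String × Int × String))) : Decidable (Spec_group_changes_by_type_py changes out) := by
  unfold Spec_group_changes_by_type_py
  exact @instDecidableEqList _ (@instDecidableEqProd _ _ (by infer_instance) (@instDecidableEqList _ (by infer_instance))) _ _

-- ===== CLAIM (what is proved, stated in full; the proofs are below) =====
def Claim_equal_group_changes_by_type_py : Prop := ∀ (changes : List (Int × String × Option String × Option String × Int × String)), Dom_group_changes_by_type_py changes → Spec_group_changes_by_type_py changes (group_changes_by_type_py changes)

-- ===== LEMMAS AND PROOFS =====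

-- A's loop appends, to each incoming bucket, exactly the records B's classify filters select.
theorem groupChangesLoopA_eq_filters
    (changes : List (Int × String × Option String × Option String × Int × String))
    (gNew gDel gRep : List (Int × String × Option String × Option String × Int × String)) :
    groupChangesLoopA changes gNew gDel gRep =
      (gNew ++ changes.filter (fun c => pvClassify c == some "新增"),
       gDel ++ changes.filter (fun c => pvClassify c == some "删除"),
       gRep ++ changes.filter (fun c => pvClassify c == some "替换")) := by
  induction changes generalizing gNew gDel gRep with
  | nil => simp [groupChangesLoopA]
  | cons c rest ih =>
    simp only [groupChangesLoopA]
    cases hOld : pvTruthy c.2.2.1 <;> cases hNew : pvTruthy c.2.2.2.1 <;>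
      simp [ih, pvClassify, hOld, hNew]

theorem group_changes_by_type_py_spec : Claim_equal_group_changes_by_type_py := by
  intro changes _
  unfold Spec_group_changes_by_type_py group_changes_by_type_py group_changes_by_type_py_alt
  simp only [groupChangesLoopA_eq_filters, List.nil_append]
  cases hN : (changes.filter (fun c => pvClassify c == some "新增")).isEmpty <;>
  cases hD : (changes.filter (fun c => pvClassify c == some "删除")).isEmpty <;>
  cases hR : (changes.filter (fun c => pvClassify c == some "替换")).isEmpty <;>
    simp [List.filter, List.filterMap, hN, hD, hR]
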